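-- pv_equiv track=rewrite | github.com/Shu-Nkosen/Imperceptible-2D-code | R6/encode0213.py | reorder_binary_string
-- ===== SOURCE A (Python) =====
-- def reorder_binary_string(binary_string):
--     # 最初の64文字をそのまま保持
--     first_part = binary_string[:64]
--     second_part = ""
--
--     # 文字列の長さを取得
--     binary_length = len(binary_string)
--
--     # 残りを16ブロック（64文字ずつ）で処理
--     for i in range(16):
--         row = 64 + i * 64  # 各ブロックの開始位置
--         for j in range(32):  # 各ブロック内で順序を指定して並び替え
--             if row + j < binary_length:  # 安全に前半を追加
--                 second_part += binary_string[row + j]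
--             if row + j + 32 < binary_length:  # 安全に後半を追加
--                 second_part += binary_string[row + j + 32]
--
--     # 最初の64文字と並び替えた残りを結合
--     result = first_part + second_part
--     return result
-- ===== SOURCE B (Python) =====
-- def reorder_binary_string(binary_string):
--     # Slice-and-riffle: keep the head, chunk the (truncated) tail into 64-char
--     # blocks, and riffle each block's two 32-char halves with zip; a partial
--     # block's unpaired first-half leftover is appended after the zipped pairs.
--     head = binary_string[:64]
--     tail = binary_string[64:1088]   # A never reads past index 1087
--     parts = [head]
--     for p in range(0, len(tail), 64):
--         block = tail[p:p + 64]
--         h, t = block[:32], block[32:]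
--         parts.append(''.join(a + b for a, b in zip(h, t)))
--         parts.append(h[len(t):])
--     return ''.join(parts)
-- ===== Notes on version B (the rewrite author's own statement) =====
-- stated objective: alternative
-- what changed: B replaces A's index-arithmetic nested loops with two bound checks per step by a slice-and-riffle decomposition: truncate to the readable prefix, chunk the tail into 64-char blocks, and riffle each block's two halves with zip, appending the unpaired first-half leftover of a partial block.
import Mathlib
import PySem

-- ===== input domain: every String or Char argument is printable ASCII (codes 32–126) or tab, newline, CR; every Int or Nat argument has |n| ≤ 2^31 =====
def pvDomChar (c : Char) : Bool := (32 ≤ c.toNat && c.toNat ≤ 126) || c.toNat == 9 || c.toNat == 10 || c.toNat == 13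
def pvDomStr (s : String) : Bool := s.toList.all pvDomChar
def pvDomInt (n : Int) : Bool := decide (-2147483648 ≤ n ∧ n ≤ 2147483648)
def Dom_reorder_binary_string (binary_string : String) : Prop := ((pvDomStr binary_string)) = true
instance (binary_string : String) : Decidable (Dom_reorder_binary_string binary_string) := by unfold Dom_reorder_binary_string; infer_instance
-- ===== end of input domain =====

-- B replaces A's index-arithmetic nested loops (two bound checks per step) by a
-- slice-and-riffle decomposition: chunk the truncated tail into 64-char blocks and
-- zip-riffle each block's halves (objective: alternative).

-- ===== PORT A =====
-- indexing binary_string[row+j] is guarded by 'row + j < binary_length', so the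
-- Nat index is in range and List.getD is exact there (the default never fires)
def reorder_binary_string (binary_string : String) : String :=
  let cs := binary_string.toList
  let first_part := PySem.List.slice cs none (some 64)
  let binary_length := cs.length
  let second_part := (List.range 16).foldl (fun sp i =>
      let row := 64 + i * 64
      (List.range 32).foldl (fun sp j =>
        let sp := if row + j < binary_length then sp ++ [cs.getD (row + j) ' '] else sp
        if row + j + 32 < binary_length then sp ++ [cs.getD (row + j + 32) ' '] else sp) sp)
    ([] : List Char)
  String.mk (first_part ++ second_part)

-- ===== PORT B =====
def reorder_binary_string_alt (binary_string : String) : String :=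
  let cs := binary_string.toList
  let head := PySem.List.slice cs none (some 64)
  let tail := PySem.List.slice cs (some 64) (some 1088)
  let parts := (PySem.List.pyRange 0 (tail.length) 64).foldl (fun parts p =>
      let block := PySem.List.slice tail (some p) (some (p + 64))
      let h := PySem.List.slice block none (some 32)
      let t := PySem.List.slice block (some 32) none
      parts ++ [(h.zip t).flatMap (fun ab => [ab.1, ab.2])] ++ [h.drop t.length])
    [head]
  String.mk parts.flatten

-- ===== PRECONDITION & SPEC =====
def Spec_reorder_binary_string (binary_string : String) (out : String) : Prop := out = reorder_binary_string_alt binary_string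
instance (binary_string : String) (out : String) : Decidable (Spec_reorder_binary_string binary_string out) := by unfold Spec_reorder_binary_string; infer_instance

-- ===== CLAIM (what is proved, stated in full; the proofs are below) =====
def Claim_equal_reorder_binary_string : Prop := ∀ (binary_string : String), Dom_reorder_binary_string binary_string → Spec_reorder_binary_string binary_string (reorder_binary_string binary_string)

-- ===== LEMMAS AND PROOFS =====

-- the zip-riffle of a block's two halves, as B computes it per block
def pvRif (b : List Char) : List Char :=
  ((b.take 32).zip (b.drop 32)).flatMap (fun ab => [ab.1, ab.2]) ++ (b.take 32).drop (b.drop 32).length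

-- A's two conditional appends in one inner loop step emit exactly one 'chunk'
theorem pv_step_chunk (cs : List Char) (row j : ℕ) (sp : List Char) :
    (let sp' := if row + j < cs.length then sp ++ [cs.getD (row + j) ' '] else sp
     if row + j + 32 < cs.length then sp' ++ [cs.getD (row + j + 32) ' '] else sp')
    = sp ++ ((if row + j < cs.length then [cs.getD (row + j) ' '] else []) ++
             (if row + j + 32 < cs.length then [cs.getD (row + j + 32) ' '] else [])) := by
  split_ifs <;> simp

-- A's second_part as a flatMap of chunks
theorem pv_second_part (cs : List Char) :
    (List.range 16).foldl (fun sp i =>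
      let row := 64 + i * 64
      (List.range 32).foldl (fun sp j =>
        let sp := if row + j < cs.length then sp ++ [cs.getD (row + j) ' '] else sp
        if row + j + 32 < cs.length then sp ++ [cs.getD (row + j + 32) ' '] else sp) sp)
      ([] : List Char)
    = (List.range 16).flatMap (fun i => (List.range 32).flatMap (fun j =>
        (if 64 + i * 64 + j < cs.length then [cs.getD (64 + i * 64 + j) ' '] else []) ++
        (if 64 + i * 64 + j + 32 < cs.length then [cs.getD (64 + i * 64 + j + 32) ' '] else []))) := by
  have hinner : ∀ (row : ℕ) (sp : List Char),
      (List.range 32).foldl (fun sp j =>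
        let sp := if row + j < cs.length then sp ++ [cs.getD (row + j) ' '] else sp
        if row + j + 32 < cs.length then sp ++ [cs.getD (row + j + 32) ' '] else sp) sp
      = sp ++ (List.range 32).flatMap (fun j =>
          (if row + j < cs.length then [cs.getD (row + j) ' '] else []) ++
          (if row + j + 32 < cs.length then [cs.getD (row + j + 32) ' '] else [])) := by
    intro row sp
    rw [show (fun sp j =>
        let sp := if row + j < cs.length then sp ++ [cs.getD (row + j) ' '] else sp
        if row + j + 32 < cs.length then sp ++ [cs.getD (row + j + 32) ' '] else sp)
      = (fun (sp : List Char) (j : ℕ) => sp ++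
          ((if row + j < cs.length then [cs.getD (row + j) ' '] else []) ++
           (if row + j + 32 < cs.length then [cs.getD (row + j + 32) ' '] else [])))
      from funext fun sp => funext fun j => pv_step_chunk cs row j sp]
    exact PySem.List.foldl_append_eq_flatMap _ _ _
  rw [show (fun (sp : List Char) (i : ℕ) =>
      let row := 64 + i * 64
      (List.range 32).foldl (fun sp j =>
        let sp := if row + j < cs.length then sp ++ [cs.getD (row + j) ' '] else sp
        if row + j + 32 < cs.length then sp ++ [cs.getD (row + j + 32) ' '] else sp) sp)
    = (fun (sp : List Char) (i : ℕ) => sp ++ (List.range 32).flatMap (fun j =>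
        (if 64 + i * 64 + j < cs.length then [cs.getD (64 + i * 64 + j) ' '] else []) ++
        (if 64 + i * 64 + j + 32 < cs.length then [cs.getD (64 + i * 64 + j + 32) ' '] else [])))
    from funext fun sp => funext fun i => hinner (64 + i * 64) sp]
  simpa using PySem.List.foldl_append_eq_flatMap _ _ ([] : List Char)

-- one conditional pick is 'take 1 of drop'
theorem pv_take_one_drop (l : List Char) (j : ℕ) :
    (l.drop j).take 1 = if j < l.length then [l.getD j ' '] else [] := by
  rcases Nat.lt_or_ge j l.length with h | h
  · rw [if_pos h, List.drop_eq_getElem_cons h, List.take_succ_cons, List.take_zero]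
    simp [List.getD_eq_getElem?_getD, List.getElem?_eq_getElem h]
  · rw [List.drop_eq_nil_of_le h, if_neg (Nat.not_lt.mpr h)]
    rfl

-- pick at absolute index r+j is 'take 1 of drop j' of the window (drop r).take n (j < n)
theorem pv_pick_shift (cs : List Char) (r n j : ℕ) (hj : j < n) :
    (((cs.drop r).take n).drop j).take 1
    = if r + j < cs.length then [cs.getD (r + j) ' '] else [] := by
  rw [pv_take_one_drop]
  have hlen : ((cs.drop r).take n).length = min n (cs.length - r) := by simp
  by_cases h : r + j < cs.length
  · rw [if_pos (by omega : j < ((cs.drop r).take n).length), if_pos h]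
    have hj' : j < ((cs.drop r).take n).length := by omega
    have hcs : r + j < cs.length := h
    simp [List.getD_eq_getElem?_getD, List.getElem?_drop, hj,
      List.getElem?_eq_getElem hcs]
  · rw [if_neg (by omega : ¬ j < ((cs.drop r).take n).length), if_neg h]

-- the riffle lemma: gathering by index j / j+half equals zip + leftover
theorem pv_riffle (m : ℕ) : ∀ (h t : List Char), t.length ≤ h.length → h.length ≤ m →
    (List.range m).flatMap (fun j => (h.drop j).take 1 ++ (t.drop j).take 1)
    = (h.zip t).flatMap (fun ab => [ab.1, ab.2]) ++ h.drop t.length := by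
  induction m with
  | zero =>
    intro h t h1 h2
    have hh : h = [] := List.eq_nil_of_length_eq_zero (Nat.le_zero.mp h2)
    subst hh
    have ht : t = [] := List.eq_nil_of_length_eq_zero (Nat.le_zero.mp h1)
    subst ht; simp
  | succ m ih =>
    intro h t h1 h2
    cases h with
    | nil =>
      have ht : t = [] := List.eq_nil_of_length_eq_zero (Nat.le_zero.mp h1)
      subst ht; simp
    | cons a h' =>
      cases t with
      | nil =>
        rw [List.range_succ_eq_map]
        simp only [List.flatMap_cons, List.flatMap_map,
          List.drop_succ_cons, List.drop_nil, List.take_nil, List.append_nil]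
        have := ih h' [] (by simp) (by simpa using Nat.lt_succ_iff.mp (by simpa using h2))
        simp only [List.drop_nil, List.take_nil, List.append_nil] at this
        simp [this]
      | cons b t' =>
        rw [List.range_succ_eq_map]
        simp only [List.flatMap_cons, List.flatMap_map,
          List.drop_succ_cons]
        have := ih h' t' (by simpa using h1) (by simpa using Nat.lt_succ_iff.mp (by simpa using h2))
        simp [this]

-- A's chunk for block window b = (cs.drop r).take 64 is the riffle of b
theorem pv_chunk_eq_rif (cs : List Char) (r : ℕ) :
    (List.range 32).flatMap (fun j =>
        (if r + j < cs.length then [cs.getD (r + j) ' '] else []) ++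
        (if r + j + 32 < cs.length then [cs.getD (r + j + 32) ' '] else []))
    = pvRif ((cs.drop r).take 64) := by
  set b := (cs.drop r).take 64 with hb
  have h1 : b.take 32 = (cs.drop r).take 32 := by
    rw [hb, List.take_take]; norm_num
  have h2 : b.drop 32 = (cs.drop (r + 32)).take 32 := by
    simp [hb, List.drop_take, List.drop_drop]
  have hc : ∀ j ∈ List.range 32,
      ((if r + j < cs.length then [cs.getD (r + j) ' '] else []) ++
       (if r + j + 32 < cs.length then [cs.getD (r + j + 32) ' '] else []))
      = ((b.take 32).drop j).take 1 ++ ((b.drop 32).drop j).take 1 := by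
    intro j hj
    have hj32 : j < 32 := List.mem_range.mp hj
    rw [h1, h2, pv_pick_shift cs r 32 j hj32, pv_pick_shift cs (r + 32) 32 j hj32]
    have : r + 32 + j = r + j + 32 := by omega
    rw [this]
  rw [List.flatMap_congr hc]
  have hle1 : (b.drop 32).length ≤ (b.take 32).length := by
    have : b.length ≤ 64 := by rw [hb]; simp
    simp; omega
  have hle2 : (b.take 32).length ≤ 32 := by simp
  exact pv_riffle 32 (b.take 32) (b.drop 32) hle1 hle2

-- B's fold with two singleton appends per step is a flatMap of pairs
theorem pv_foldB (f g : ℤ → List Char) (l : List ℤ) (acc : List (List Char)) :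
    l.foldl (fun parts p => parts ++ [f p] ++ [g p]) acc
    = acc ++ l.flatMap (fun p => [f p, g p]) := by
  rw [show (fun (parts : List (List Char)) p => parts ++ [f p] ++ [g p])
      = fun (parts : List (List Char)) p => parts ++ ([f p] ++ [g p])
    from funext fun _ => funext fun _ => by simp]
  exact PySem.List.foldl_append_eq_flatMap _ _ _

theorem pv_flatten_pairs (f g : ℤ → List Char) (l : List ℤ) :
    (l.flatMap (fun p => [f p, g p])).flatten = l.flatMap (fun p => f p ++ g p) := by
  induction l with
  | nil => rfl
  | cons p l ih => simp [ih]

-- B's block at start p = 64*k (k ≤ 15) is A's window (cs.drop (64 + k*64)).take 64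
theorem pv_block_eq (cs : List Char) (k : ℕ) (hk : k ≤ 15) :
    PySem.List.slice (PySem.List.slice cs (some 64) (some 1088))
        (some ((64 : ℤ) * (k : ℕ))) (some ((64 : ℤ) * (k : ℕ) + 64))
    = (cs.drop (64 + k * 64)).take 64 := by
  have htail : PySem.List.slice cs (some 64) (some 1088) = (cs.drop 64).take 1024 := by
    rw [PySem.List.slice_toNat cs (by norm_num) (by norm_num)]
    simp
  have hcast : ((64 : ℤ) * (k : ℕ)) = ((64 * k : ℕ) : ℤ) := by push_cast; ring
  have hcast2 : ((64 : ℤ) * (k : ℕ) + 64) = ((64 * k + 64 : ℕ) : ℤ) := by push_cast; ring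
  rw [show (64:ℕ) + k * 64 = 64 * k + 64 from by ring]
  rw [htail, hcast2, hcast, PySem.List.slice_natCast]
  have h64 : 64 * k + 64 - 64 * k = 64 := by omega
  rw [h64, List.drop_take, List.drop_drop, List.take_take]
  rw [show (64:ℕ) * k + 64 = 64 + 64 * k from by ring,
      show min 64 (1024 - 64 * k) = 64 from by omega,
      show (64:ℕ) + 64 * k = 64 * k + 64 from by ring]

theorem pv_main (s : String) : reorder_binary_string s = reorder_binary_string_alt s := by
  unfold reorder_binary_string reorder_binary_string_alt
  simp only []
  set cs := s.toList with hcs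
  refine congrArg String.mk ?_
  -- A side
  rw [pv_second_part]
  have hchunks : (List.range 16).flatMap (fun i => (List.range 32).flatMap (fun j =>
        (if 64 + i * 64 + j < cs.length then [cs.getD (64 + i * 64 + j) ' '] else []) ++
        (if 64 + i * 64 + j + 32 < cs.length then [cs.getD (64 + i * 64 + j + 32) ' '] else [])))
      = (List.range 16).flatMap (fun i => pvRif ((cs.drop (64 + i * 64)).take 64)) := by
    refine List.flatMap_congr ?_
    intro i _
    exact pv_chunk_eq_rif cs (64 + i * 64)
  rw [hchunks]
  -- B side: fold → flatMap of pairs → flatMap of riffles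
  rw [pv_foldB, List.cons_append, List.nil_append, List.flatten_cons, pv_flatten_pairs]
  rw [PySem.List.slice_to cs (by norm_num : (0:ℤ) ≤ 64)]
  norm_num
  set tl := PySem.List.slice cs (some 64) (some 1088) with htl
  have hterm : ∀ p : ℤ,
      ((PySem.List.slice (PySem.List.slice tl (some p) (some (p + 64))) none (some 32)).zip
          (PySem.List.slice (PySem.List.slice tl (some p) (some (p + 64))) (some 32) none)
          |>.flatMap (fun ab => [ab.1, ab.2])) ++
        (PySem.List.slice (PySem.List.slice tl (some p) (some (p + 64))) none (some 32)).drop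
          (PySem.List.slice (PySem.List.slice tl (some p) (some (p + 64))) (some 32) none).length
      = pvRif (PySem.List.slice tl (some p) (some (p + 64))) := by
    intro p
    rw [PySem.List.slice_to _ (by norm_num : (0:ℤ) ≤ 32),
        PySem.List.slice_from _ (by norm_num : (0:ℤ) ≤ 32)]
    simp [pvRif, show ((32:ℤ).toNat = 32) from rfl]
  refine Eq.trans ?_ (List.flatMap_congr fun p _ => (hterm p).symm)
  -- the length of the truncated tail and the block count
  have hLlen : tl.length = min 1024 (cs.length - 64) := by
    rw [htl, PySem.List.slice_toNat cs (by norm_num) (by norm_num)]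
    simp
  set L := tl.length with hL
  have hL1024 : L ≤ 1024 := by omega
  have hdm := Nat.div_add_mod (L + 63) 64
  have hmlt : (L + 63) % 64 < 64 := Nat.mod_lt _ (by norm_num)
  set nb := (L + 63) / 64 with hnb
  have hnb16 : nb ≤ 16 := by omega
  have hLnb : L ≤ 64 * nb := by omega
  -- the pyRange of block starts is 64*k for k < nb
  rw [PySem.List.pyRange_of_pos 0 (L : ℤ) (by norm_num : (0:ℤ) < 64)]
  have hif : (if (0:ℤ) < (L:ℤ) then (((L:ℤ) - 0 + 64 - 1) / 64).toNat else 0) = nb := by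
    split_ifs with h <;> omega
  rw [hif, List.flatMap_map]
  simp only [zero_add]
  -- B's blocks for k < nb are A's windows
  have hBk : ∀ k ∈ List.range nb,
      pvRif (PySem.List.slice tl (some ((64:ℤ) * (k:ℕ))) (some ((64:ℤ) * (k:ℕ) + 64)))
      = pvRif ((cs.drop (64 + k * 64)).take 64) := by
    intro k hk
    have hk' : k < nb := List.mem_range.mp hk
    rw [htl, pv_block_eq cs k (by omega)]
  rw [List.flatMap_congr hBk]
  -- A's windows for nb ≤ i < 16 are empty
  rw [show (16:ℕ) = nb + (16 - nb) from by omega, List.range_add, List.flatMap_append]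
  have hrest : (List.map (fun i => nb + i) (List.range (16 - nb))).flatMap
      (fun i => pvRif ((cs.drop (64 + i * 64)).take 64)) = [] := by
    rw [List.flatMap_map]
    refine List.flatMap_eq_nil_iff.mpr ?_
    intro q hq
    have hq' : q < 16 - nb := List.mem_range.mp hq
    have hnblt : nb < 16 := by omega
    have hLlt : L < 1024 := by omega
    have hlen : cs.length ≤ 64 + (nb + q) * 64 := by omega
    rw [List.drop_eq_nil_of_le hlen, List.take_nil]
    simp [pvRif]
  rw [hrest, List.append_nil]

-- ===== VERDICT (by name: the statement is the Claim_ definition above) =====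
theorem reorder_binary_string_spec : Claim_equal_reorder_binary_string := by
  intro s _
  exact pv_main s
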